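-- pv_equiv track=rewrite | github.com/hyowonsong/Algorithm1 | 백준/Silver/1789. 수들의 합/수들의 합.py | solution
-- ===== SOURCE A (Python) =====
-- def solution(S):
--     # 이분 탐색을 위한 초기값 설정
--     left, right = 1, 4294967295  # 넉넉한 범위로 설정
--
--     while left <= right:
--         mid = (left + right) // 2
--         # 연속된 자연수의 합 계산
--         current_sum = mid * (mid + 1) // 2
--
--         if current_sum <= S:
--             left = mid + 1  # 더 큰 N을 찾기 위해
--         else:
--             right = mid - 1  # 더 작은 N으로 조정
--
--     return right
-- ===== SOURCE B (Python) =====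
-- def solution(S):
--     # Greedy accumulation: keep adding the next natural number while the
--     # running triangular sum stays within S; n ends as the largest count.
--     n = 0
--     total = 0
--     while total + n + 1 <= S:
--         n += 1
--         total += n
--     return n
-- ===== Notes on version B (the rewrite author's own statement) =====
-- stated objective: simpler
-- what changed: Replaces the fixed-range binary search by a direct greedy accumulation of the triangular sum, which is shorter and needs no arbitrary upper bound.
import Mathlib
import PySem

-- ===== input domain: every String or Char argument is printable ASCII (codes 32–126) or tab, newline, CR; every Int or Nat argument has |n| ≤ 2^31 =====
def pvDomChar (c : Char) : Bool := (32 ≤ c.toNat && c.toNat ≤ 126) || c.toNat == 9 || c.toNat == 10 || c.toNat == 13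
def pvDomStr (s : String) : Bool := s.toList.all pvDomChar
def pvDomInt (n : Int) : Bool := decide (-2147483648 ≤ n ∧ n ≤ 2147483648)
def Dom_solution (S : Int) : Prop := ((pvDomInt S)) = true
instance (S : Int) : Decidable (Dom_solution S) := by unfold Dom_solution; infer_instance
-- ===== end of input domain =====

-- B replaces A's binary search over a fixed 2^32 range by a direct greedy
-- accumulation of the triangular sum (objective: simpler).

-- ===== PORT A =====
-- the while-loop of A, recursing on the shrinking interval [left, right]
def pvBsLoop (S left right : Int) : Int :=
  if _h : left ≤ right then
    let mid := PySem.Int.floordiv (left + right) 2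
    let current_sum := PySem.Int.floordiv (mid * (mid + 1)) 2
    if current_sum ≤ S then pvBsLoop S (mid + 1) right
    else pvBsLoop S left (mid - 1)
  else right
termination_by (right + 1 - left).toNat
decreasing_by
  · have := PySem.Int.floordiv_two_mid_bounds (lo := left) (hi := right) _h
    omega
  · have := PySem.Int.floordiv_two_mid_bounds (lo := left) (hi := right) _h
    omega

def solution (S : Int) : Int := pvBsLoop S 1 4294967295

-- ===== PORT B =====
-- B's while-loop; n and total are provably nonnegative, carried as Nat
def pvAccLoop (S : Int) (n total : Nat) : Int :=
  if _h : (total : Int) + n + 1 ≤ S then pvAccLoop S (n + 1) (total + n + 1)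
  else n
termination_by S.toNat - n
decreasing_by
  have hn : (n : Int) + 1 ≤ S := by
    have : (0:Int) ≤ (total : Int) := by exact_mod_cast Nat.zero_le total
    omega
  omega

def solution_alt (S : Int) : Int := pvAccLoop S 0 0

-- ===== PRECONDITION & SPEC =====
def Spec_solution (S : Int) (out : Int) : Prop := out = solution_alt S
instance (S : Int) (out : Int) : Decidable (Spec_solution S out) := by unfold Spec_solution; infer_instance

-- ===== CLAIM (what is proved, stated in full; the proofs are below) =====
def Claim_equal_solution : Prop := ∀ (S : Int), Dom_solution S → Spec_solution S (solution S)

-- ===== LEMMAS AND PROOFS =====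

-- characterization predicate: r is the largest count with r(r+1) ≤ 2S
def pvChar (S r : Int) : Prop :=
  0 ≤ r ∧ (∀ m : Int, 1 ≤ m → m ≤ r → m * (m + 1) ≤ 2 * S) ∧ 2 * S < (r + 1) * (r + 2)

lemma pvChar_unique (S r₁ r₂ : Int) (h₁ : pvChar S r₁) (h₂ : pvChar S r₂) : r₁ = r₂ := by
  obtain ⟨n₁, a₁, b₁⟩ := h₁
  obtain ⟨n₂, a₂, b₂⟩ := h₂
  by_contra hne
  rcases lt_or_gt_of_ne hne with h | h
  · have := a₂ (r₁ + 1) (by omega) (by omega); linarith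
  · have := a₁ (r₂ + 1) (by omega) (by omega); linarith

lemma pvMono (a b : Int) (h0 : 0 ≤ a) (hab : a ≤ b) : a * (a + 1) ≤ b * (b + 1) := by
  nlinarith

lemma pvFd2_le (k S : Int) (hk : Even k) : PySem.Int.floordiv k 2 ≤ S ↔ k ≤ 2 * S := by
  rw [PySem.Int.floordiv_eq_ediv_of_pos (by omega)]
  obtain ⟨c, rfl⟩ := hk
  omega

lemma pvBsLoop_char (S left right : Int) (h0 : 1 ≤ left) (h1 : left ≤ right + 1)
    (hL : ∀ m : Int, 1 ≤ m → m < left → m * (m + 1) ≤ 2 * S)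
    (hR : 2 * S < (right + 1) * (right + 2)) :
    pvChar S (pvBsLoop S left right) := by
  fun_induction pvBsLoop S left right with
  | case1 left right hlr mid cs hcs ih =>
    have hmb : left ≤ mid ∧ mid ≤ right :=
      PySem.Int.floordiv_two_mid_bounds (lo := left) (hi := right) hlr
    apply ih (by omega)
    · omega
    · intro m hm1 hm2
      rcases lt_or_ge m left with h | h
      · exact hL m hm1 h
      · have hmid : 0 ≤ mid := by omega
        have hcs' : mid * (mid + 1) ≤ 2 * S := by
          have := (pvFd2_le (mid * (mid + 1)) S (Int.even_mul_succ_self mid)).mp hcs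
          exact this
        calc m * (m + 1) ≤ mid * (mid + 1) := pvMono m mid (by omega) (by omega)
          _ ≤ 2 * S := hcs'
    · exact hR
  | case2 left right hlr mid cs hcs ih =>
    have hmb : left ≤ mid ∧ mid ≤ right :=
      PySem.Int.floordiv_two_mid_bounds (lo := left) (hi := right) hlr
    apply ih h0
    · omega
    · exact hL
    · have hcs' : 2 * S < mid * (mid + 1) := by
        have := (pvFd2_le (mid * (mid + 1)) S (Int.even_mul_succ_self mid)).not.mp hcs
        omega
      have heq : (mid - 1 + 1) * (mid - 1 + 2) = mid * (mid + 1) := by ring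
      omega
  | case3 left right hlr =>
    refine ⟨by omega, fun m hm1 hm2 => hL m hm1 (by omega), hR⟩

lemma pvAccLoop_char (S : Int) (n total : Nat) (ht : 2 * (total : Int) = n * (n + 1))
    (hprev : ∀ m : Int, 1 ≤ m → m ≤ (n : Int) → m * (m + 1) ≤ 2 * S) :
    pvChar S (pvAccLoop S n total) := by
  fun_induction pvAccLoop S n total with
  | case1 n total hc ih =>
    apply ih
    · push_cast; linear_combination ht
    · intro m hm1 hm2
      rcases lt_or_ge m ((n : Int) + 1) with h | h
      · exact hprev m hm1 (by omega)
      · have hmn : m = (n : Int) + 1 := by push_cast at hm2 ⊢; omega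
        subst hmn
        nlinarith
  | case2 n total hc =>
    refine ⟨by positivity, hprev, ?_⟩
    nlinarith [hc]

-- ===== VERDICT (by name: the statement is the Claim_ definition above) =====
theorem solution_spec : Claim_equal_solution := by
  intro S hDom
  have hS : S ≤ 2147483648 := by
    unfold Dom_solution pvDomInt at hDom
    simpa using (of_decide_eq_true hDom).2
  have hA : pvChar S (solution S) := by
    unfold solution
    apply pvBsLoop_char S 1 4294967295 le_rfl (by omega)
    · intro m hm1 hm2; omega
    · nlinarith
  have hB : pvChar S (solution_alt S) := by
    unfold solution_alt
    apply pvAccLoop_char S 0 0 (by norm_num)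
    intro m hm1 hm2; omega
  exact pvChar_unique S _ _ hA hB
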